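-- pv_equiv track=rewrite | github.com/lilyluo7412/nlp-final-project-group2 | src/candidate_extraction.py | build_doc_candidate_counts
-- ===== SOURCE A (Python) =====
-- from collections import Counter
--
-- def build_doc_candidate_counts(
--     doc_to_candidates: dict[str, list[str]],
--     min_freq: int,
-- ) -> dict[str, Counter[str]]:
--     global_counts = Counter()
--     for cands in doc_to_candidates.values():
--         global_counts.update(cands)
--     out: dict[str, Counter[str]] = {}
--     for doc_id, cands in doc_to_candidates.items():
--         out[doc_id] = Counter([c for c in cands if global_counts[c] >= min_freq])
--     return out
-- ===== SOURCE B (Python) =====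
-- from collections import Counter
--
-- def build_doc_candidate_counts(
--     doc_to_candidates: dict[str, list[str]],
--     min_freq: int,
-- ) -> dict[str, "Counter[str]"]:
--     # Sort-then-scan: sort all candidate occurrences, find frequent candidates by
--     # run-length scanning the sorted list (no global hash counting), then count
--     # each document in a single incremental pass over the kept occurrences.
--     flat = sorted(c for cands in doc_to_candidates.values() for c in cands)
--     n = len(flat)
--     keep = set()
--     i = 0
--     while i < n:
--         j = i + 1
--         while j < n and flat[j] == flat[i]:
--             j += 1
--         if j - i >= min_freq:
--             keep.add(flat[i])
--         i = j
--     out: dict[str, Counter[str]] = {}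
--     for doc_id, cands in doc_to_candidates.items():
--         ctr = Counter()
--         for c in cands:
--             if c in keep:
--                 ctr[c] += 1
--         out[doc_id] = ctr
--     return out
-- ===== Notes on version B (the rewrite author's own statement) =====
-- stated objective: alternative
-- what changed: B finds the globally frequent candidates by sorting all candidate occurrences and run-length scanning the sorted list with two index loops (no global hash Counter), then counts each document in one guarded incremental pass over its kept occurrences, instead of A's Counter.update global pass plus per-doc filter-then-Counter comprehension.
import Mathlib
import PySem

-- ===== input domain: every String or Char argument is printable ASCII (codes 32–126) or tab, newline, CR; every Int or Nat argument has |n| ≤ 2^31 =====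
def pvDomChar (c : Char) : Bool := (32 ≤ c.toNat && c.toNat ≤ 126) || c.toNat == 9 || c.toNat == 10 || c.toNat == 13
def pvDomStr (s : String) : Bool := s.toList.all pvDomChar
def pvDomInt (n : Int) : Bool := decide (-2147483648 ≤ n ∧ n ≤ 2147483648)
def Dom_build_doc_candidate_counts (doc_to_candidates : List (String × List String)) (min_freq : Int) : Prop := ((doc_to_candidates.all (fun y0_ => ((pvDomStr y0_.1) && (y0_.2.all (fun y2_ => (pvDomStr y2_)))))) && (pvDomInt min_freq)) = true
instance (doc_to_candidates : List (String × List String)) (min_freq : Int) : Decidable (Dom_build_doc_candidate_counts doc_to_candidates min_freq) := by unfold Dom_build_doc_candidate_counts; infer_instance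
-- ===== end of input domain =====

-- B replaces A's hash-based global counting by sort-then-run-length-scan to find the frequent
-- candidates, then counts each document in one incremental pass over the kept occurrences
-- ("alternative": a different algorithm of similar cost, not claimed faster).


-- ===== PORT A =====
def build_doc_candidate_counts (doc_to_candidates : List (String × List String)) (min_freq : Int) : List (String × List (String × Int)) :=
  let global_counts : PySem.Dict String Int :=
    doc_to_candidates.foldl (fun g p => p.2.foldl (fun d c => d.modify c 0 (· + 1)) g) PySem.Dict.empty
  let out : PySem.Dict String (List (String × Int)) :=
    doc_to_candidates.foldl
      (fun o p =>
        o.insert p.1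
          ((PySem.Dict.counter (p.2.filter (fun c => decide (min_freq ≤ global_counts.getD c 0)))).items))
      PySem.Dict.empty
  out.items

-- ===== PORT B =====
-- inner 'while j < n and flat[j] == flat[i]: j += 1' (c is flat[i])
def pvInnerScan (flat : List String) (n : Nat) (c : String) (j : Nat) : Nat :=
  if j < n then
    if flat.getD j "" == c then pvInnerScan flat n c (j + 1) else j
  else j
termination_by n - j

-- the inner while loop never moves j backwards (termination of the outer loop cites this)
theorem pvInnerScan_lower (flat : List String) (n : Nat) (c : String) (j : Nat) :
    j ≤ pvInnerScan flat n c j := by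
  induction hk : n - j using Nat.strong_induction_on generalizing j with
  | _ k ih =>
    unfold pvInnerScan
    split
    · split
      · exact le_trans (Nat.le_succ j) (ih (n - (j + 1)) (by omega) (j + 1) rfl)
      · exact le_refl j
    · exact le_refl j

-- outer 'while i < n: … i = j' building the keep set
def pvOuterScan (flat : List String) (n : Nat) (mf : Int) (keep : PySem.Set String) (i : Nat) : PySem.Set String :=
  if i < n then
    let j := pvInnerScan flat n (flat.getD i "") (i + 1)
    pvOuterScan flat n mf
      (if mf ≤ (j : Int) - (i : Int) then PySem.Set.add keep (flat.getD i "") else keep) j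
  else keep
termination_by n - i
decreasing_by
  have := pvInnerScan_lower flat n (flat.getD i "") (i + 1)
  omega

def build_doc_candidate_counts_alt (doc_to_candidates : List (String × List String)) (min_freq : Int) : List (String × List (String × Int)) :=
  let flat : List String := PySem.List.sorted ((doc_to_candidates.map Prod.snd).flatten) (fun x => x) false
  let n := flat.length
  let keep : PySem.Set String := pvOuterScan flat n min_freq PySem.Set.empty 0
  let out : PySem.Dict String (List (String × Int)) :=
    doc_to_candidates.foldl
      (fun o p =>
        o.insert p.1
          ((p.2.foldl (fun d c => if PySem.Set.contains keep c then d.modify c 0 (· + 1) else d)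
              PySem.Dict.empty).items))
      PySem.Dict.empty
  out.items

-- ===== PRECONDITION & SPEC =====
def Spec_build_doc_candidate_counts (doc_to_candidates : List (String × List String)) (min_freq : Int) (out : List (String × List (String × Int))) : Prop := out = build_doc_candidate_counts_alt doc_to_candidates min_freq
instance (doc_to_candidates : List (String × List String)) (min_freq : Int) (out : List (String × List (String × Int))) : Decidable (Spec_build_doc_candidate_counts doc_to_candidates min_freq out) := by unfold Spec_build_doc_candidate_counts; infer_instance

-- ===== CLAIM (what is proved, stated in full; the proofs are below) =====
def Claim_equal_build_doc_candidate_counts : Prop := ∀ (doc_to_candidates : List (String × List String)) (min_freq : Int), Dom_build_doc_candidate_counts doc_to_candidates min_freq → Spec_build_doc_candidate_counts doc_to_candidates min_freq (build_doc_candidate_counts doc_to_candidates min_freq)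

-- ===== LEMMAS AND PROOFS =====

-- A's update loop over all documents counts exactly the flattened candidate lists.
theorem pv_global_getD (docs : List (String × List String)) (d : PySem.Dict String Int) (c : String) :
    (docs.foldl (fun g p => p.2.foldl (fun d x => d.modify x 0 (· + 1)) g) d).getD c 0
      = d.getD c 0 + ((docs.map Prod.snd).flatten).count c := by
  induction docs generalizing d with
  | nil => simp
  | cons p t ih =>
      simp only [List.foldl_cons, List.map_cons, List.flatten_cons, List.count_append]
      rw [ih, PySem.Dict.getD_foldl_modify_add_one]
      push_cast; ring

-- list-form of the outer scan: consume one maximal run at a time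
def pvOuterL (mf : Int) (keep : PySem.Set String) : List String → PySem.Set String
  | [] => keep
  | c :: t =>
      pvOuterL mf
        (if mf ≤ (1 : Int) + ((t.takeWhile (· == c)).length : Int) then PySem.Set.add keep c else keep)
        (t.dropWhile (· == c))
termination_by l => l.length
decreasing_by
  have := List.length_dropWhile_le (· == c) t
  simp only [List.length_cons]; omega

-- dropping the leading run reaches the dropWhile suffix (no named lemma closes this)
theorem pv_drop_length_takeWhile (p : String → Bool) (l : List String) :
    l.drop (l.takeWhile p).length = l.dropWhile p := by
  induction l with
  | nil => rfl
  | cons a l ih => by_cases h : p a <;> simp [h, ih]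

-- the inner while loop measures the leading run of c in the suffix
theorem pvInnerScan_spec (flat : List String) (c : String) (j : Nat) (hj : j ≤ flat.length) :
    pvInnerScan flat flat.length c j = j + ((flat.drop j).takeWhile (· == c)).length := by
  induction hk : flat.length - j using Nat.strong_induction_on generalizing j with
  | _ k ih =>
    unfold pvInnerScan
    by_cases h : j < flat.length
    · have hdrop : flat.drop j = flat[j] :: flat.drop (j + 1) := List.drop_eq_getElem_cons h
      have hgetD : flat.getD j "" = flat[j] := List.getD_eq_getElem flat "" h
      simp only [h, if_true, hgetD, hdrop]
      by_cases he : flat[j] == c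
      · simp only [he, if_true, List.takeWhile_cons, List.length_cons]
        rw [ih (flat.length - (j + 1)) (by omega) (j + 1) (by omega) rfl]
        omega
      · simp only [List.takeWhile_cons]
        simp [he]
    · have : j = flat.length := by omega
      simp [this]

-- the index-based outer scan is the list-form scan on the remaining suffix
theorem pvOuterScan_eq_pvOuterL (flat : List String) (mf : Int) (keep : PySem.Set String)
    (i : Nat) (hi : i ≤ flat.length) :
    pvOuterScan flat flat.length mf keep i = pvOuterL mf keep (flat.drop i) := by
  induction hk : flat.length - i using Nat.strong_induction_on generalizing i keep with
  | _ k ih =>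
    unfold pvOuterScan
    by_cases h : i < flat.length
    · have hdrop : flat.drop i = flat[i] :: flat.drop (i + 1) := List.drop_eq_getElem_cons h
      have hgetD : flat.getD i "" = flat[i] := List.getD_eq_getElem flat "" h
      have hspec := pvInnerScan_spec flat flat[i] (i + 1) (by omega)
      have htw : ((flat.drop (i + 1)).takeWhile (· == flat[i])).length ≤ flat.length - (i + 1) := by
        have h1 := (List.takeWhile_sublist (l := flat.drop (i + 1)) (· == flat[i])).length_le
        have h2 : (flat.drop (i + 1)).length = flat.length - (i + 1) := List.length_drop
        omega
      set t := ((flat.drop (i + 1)).takeWhile (· == flat[i])).length with ht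
      have hrun : flat.drop (i + 1 + t) = (flat.drop (i + 1)).dropWhile (· == flat[i]) := by
        have hdt := pv_drop_length_takeWhile (· == flat[i]) (flat.drop (i + 1))
        rw [← ht] at hdt
        rw [← hdt, List.drop_drop]
        try congr 1
        try omega
      simp only [h, if_true, hgetD, hspec]
      rw [ih (flat.length - (i + 1 + t)) (by omega) _ (i + 1 + t) (by omega) rfl]
      rw [hrun]
      conv_rhs => rw [hdrop]
      simp only [pvOuterL]
      have hcond : (mf ≤ ((i + 1 + t : Nat) : Int) - (i : Int)) ↔ (mf ≤ (1 : Int) + (t : Int)) := by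
        constructor <;> intro hx <;> push_cast at * <;> omega
      by_cases hc : mf ≤ (1 : Int) + (t : Int)
      · rw [if_pos (hcond.mpr hc), if_pos hc]
      · rw [if_neg (fun hx => hc (hcond.mp hx)), if_neg hc]
    · have : i = flat.length := by omega
      simp [this, pvOuterL]

-- on a sorted list, the head does not reappear after its leading run
theorem pv_head_not_mem_dropWhile (c : String) (t : List String)
    (hp : (c :: t).Pairwise (· ≤ ·)) : c ∉ t.dropWhile (· == c) := by
  intro hmem
  rcases List.pairwise_cons.mp hp with ⟨hle, hpt⟩
  cases hrest : t.dropWhile (· == c) with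
  | nil => rw [hrest] at hmem; exact absurd hmem (List.not_mem_nil)
  | cons h r =>
      have hhd : ¬ (h == c) = true := by
        have := List.head_dropWhile_not (· == c) (l := t)
        rw [hrest] at this; simpa using this (by simp)
      have hne : h ≠ c := fun he => hhd (by simp [he])
      rw [hrest] at hmem
      rcases List.mem_cons.mp hmem with he | hr
      · exact hne he.symm
      · -- c occurs after h in t, so h ≤ c; also c ≤ h since h ∈ t; contradiction
        have hsub : (h :: r).Sublist t := hrest ▸ List.dropWhile_sublist (· == c)
        have hph : (h :: r).Pairwise (· ≤ ·) := hpt.sublist hsub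
        have h1 : h ≤ c := (List.pairwise_cons.mp hph).1 c hr
        have h2 : c ≤ h := hle h (hsub.mem (by simp))
        exact hne (le_antisymm h1 h2)

-- every element of the leading run equals the head
theorem pv_mem_takeWhile_eq (c x : String) (t : List String)
    (hx : x ∈ t.takeWhile (· == c)) : x = c := by
  have := List.mem_takeWhile_imp hx
  simpa using this

-- membership in the run-scan keep set ↔ frequent in the sorted list
theorem pvOuterL_mem (mf : Int) (l : List String) (keep : PySem.Set String) (x : String)
    (hp : l.Pairwise (· ≤ ·)) :
    x ∈ pvOuterL mf keep l ↔ x ∈ keep ∨ (x ∈ l ∧ mf ≤ (l.count x : Int)) := by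
  induction hn : l.length using Nat.strong_induction_on generalizing l keep with
  | _ k ih =>
    cases l with
    | nil => simp [pvOuterL]
    | cons c t =>
        have hpt : t.Pairwise (· ≤ ·) := (List.pairwise_cons.mp hp).2
        have hrest_p : (t.dropWhile (· == c)).Pairwise (· ≤ ·) :=
          hpt.sublist (List.dropWhile_sublist (· == c))
        have hlen : (t.dropWhile (· == c)).length < k := by
          have := List.length_dropWhile_le (· == c) t
          simp only [List.length_cons] at hn; omega
        have hnotin : c ∉ t.dropWhile (· == c) := pv_head_not_mem_dropWhile c t hp
        have hsplit : t = t.takeWhile (· == c) ++ t.dropWhile (· == c) :=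
          (List.takeWhile_append_dropWhile).symm
        rw [pvOuterL, ih _ hlen _ _ hrest_p rfl]
        by_cases hx : x = c
        · subst hx
          have hx_not : ¬ (x ∈ t.dropWhile (· == x) ∧ mf ≤ ((t.dropWhile (· == x)).count x : Int)) :=
            fun hcontra => hnotin hcontra.1
          have hcount : (x :: t).count x = 1 + (t.takeWhile (· == x)).length := by
            rw [List.count_cons_self]
            conv_lhs => rw [hsplit]
            rw [List.count_append]
            have h1 : (t.takeWhile (· == x)).count x = (t.takeWhile (· == x)).length :=
              List.count_eq_length.mpr (fun b hb => (pv_mem_takeWhile_eq x b t hb).symm)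
            have h2 : (t.dropWhile (· == x)).count x = 0 :=
              List.count_eq_zero.mpr hnotin
            omega
          have hmemx : x ∈ x :: t := List.mem_cons_self
          by_cases hc : mf ≤ (1 : Int) + ((t.takeWhile (· == x)).length : Int)
          · rw [if_pos hc]
            have hxk : x ∈ PySem.Set.add keep x := (PySem.Set.mem_add keep x x).mpr (Or.inr rfl)
            constructor
            · intro _
              exact Or.inr ⟨hmemx, by rw [hcount]; push_cast; omega⟩
            · intro _
              exact Or.inl hxk
          · rw [if_neg hc]
            constructor
            · intro h
              rcases h with h | h
              · exact Or.inl h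
              · exact absurd h hx_not
            · intro h
              rcases h with h | h
              · exact Or.inl h
              · exact absurd (by rw [hcount] at h; push_cast at h ⊢; omega :
                  mf ≤ (1 : Int) + ((t.takeWhile (· == x)).length : Int)) hc
        · -- x ≠ c: run contributes nothing
          have hrun0 : (t.takeWhile (· == c)).count x = 0 :=
            List.count_eq_zero.mpr (fun hm => hx (pv_mem_takeWhile_eq c x t hm))
          have hcount : ((c :: t).count x) = ((t.dropWhile (· == c)).count x) := by
            have hx' : c ≠ x := fun h => hx h.symm
            rw [List.count_cons_of_ne hx']
            conv_lhs => rw [hsplit]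
            rw [List.count_append, hrun0, Nat.zero_add]
          have hmem : x ∈ t.dropWhile (· == c) ↔ x ∈ c :: t := by
            constructor
            · intro h; exact List.mem_cons_of_mem c (hsplit ▸ List.mem_append_right _ h)
            · intro h
              rcases List.mem_cons.mp h with h | h
              · exact absurd h hx
              · rw [hsplit] at h
                rcases List.mem_append.mp h with h | h
                · exact absurd (pv_mem_takeWhile_eq c x t h) hx
                · exact h
          have hkeep' : x ∈ (if mf ≤ (1 : Int) + ((t.takeWhile (· == c)).length : Int)
              then PySem.Set.add keep c else keep) ↔ x ∈ keep := by
            split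
            · rw [PySem.Set.mem_add keep c x]
              exact ⟨fun h => h.resolve_right hx, Or.inl⟩
            · exact Iff.rfl
          rw [hkeep', hmem, hcount]

-- the keep set is exactly the globally frequent candidates
theorem pv_keep_mem (flatten : List String) (mf : Int) (x : String) :
    x ∈ pvOuterScan (PySem.List.sorted flatten (fun x => x) false)
        (PySem.List.sorted flatten (fun x => x) false).length mf PySem.Set.empty 0
      ↔ x ∈ flatten ∧ mf ≤ (flatten.count x : Int) := by
  set flat := PySem.List.sorted flatten (fun x => x) false with hflat
  have hperm : flat.Perm flatten := PySem.List.sorted_perm flatten (fun x => x) false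
  have hp : flat.Pairwise (· ≤ ·) := by
    have := PySem.List.sorted_pairwise flatten (fun x => x)
    simpa using this
  rw [pvOuterScan_eq_pvOuterL flat mf PySem.Set.empty 0 (by omega), List.drop_zero,
    pvOuterL_mem mf flat PySem.Set.empty x hp]
  have h1 : x ∈ flat ↔ x ∈ flatten := hperm.mem_iff
  have h2 : flat.count x = flatten.count x := hperm.count_eq x
  simp [PySem.Set.empty, h1, h2]

-- ===== VERDICT (by name: the statement is the Claim_ definition above) =====
theorem build_doc_candidate_counts_spec : Claim_equal_build_doc_candidate_counts := by
  intro docs mf _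
  unfold Spec_build_doc_candidate_counts build_doc_candidate_counts build_doc_candidate_counts_alt
  simp only []
  congr 1
  apply PySem.List.foldl_congr_mem
  intro acc p hmem
  congr 1
  -- B's guarded counting loop is the counter of the filtered list
  rw [PySem.List.foldl_if_eq_foldl_filter (p := fun c => PySem.Set.contains
        (pvOuterScan (PySem.List.sorted ((docs.map Prod.snd).flatten) (fun x => x) false)
          (PySem.List.sorted ((docs.map Prod.snd).flatten) (fun x => x) false).length mf
          PySem.Set.empty 0) c)]
  rw [← PySem.Dict.counter_eq_foldl]
  refine congrArg (fun l : List String => (PySem.Dict.counter l).items) (List.filter_congr ?_)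
  intro c hc
  have hcflat : c ∈ (docs.map Prod.snd).flatten :=
    List.mem_flatten.mpr ⟨p.2, List.mem_map.mpr ⟨p, hmem, rfl⟩, hc⟩
  have hglobal : (docs.foldl (fun g p => p.2.foldl (fun d x => d.modify x 0 (· + 1)) g)
      PySem.Dict.empty).getD c 0 = (((docs.map Prod.snd).flatten).count c : Int) := by
    rw [pv_global_getD]; simp
  rw [hglobal]
  have hmemiff : (PySem.Set.contains
      (pvOuterScan (PySem.List.sorted ((docs.map Prod.snd).flatten) (fun x => x) false)
        (PySem.List.sorted ((docs.map Prod.snd).flatten) (fun x => x) false).length mf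
        PySem.Set.empty 0) c = true)
      ↔ mf ≤ (((docs.map Prod.snd).flatten).count c : Int) := by
    rw [PySem.Set.contains_iff, pv_keep_mem]
    exact ⟨fun h => h.2, fun h => ⟨hcflat, h⟩⟩
  by_cases hge : mf ≤ (((docs.map Prod.snd).flatten).count c : Int)
  · rw [decide_eq_true hge]
    exact (hmemiff.mpr hge).symm
  · rw [decide_eq_false hge]
    exact (Bool.eq_false_iff.mpr (fun h => hge (hmemiff.mp h))).symm
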